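-- pv_equiv track=rewrite | github.com/Raj-9747/erp-gst | app.py | _pick_date_col
-- ===== SOURCE A (Python) =====
-- from typing import List, Optional, Tuple
--
-- def _pick_date_col(cols: List[str]) -> Optional[str]:
--     for c in cols:
--         l = c.lower()
--         if "invoice" in l and "date" in l:
--             return c
--     for c in cols:
--         if "date" in c.lower():
--             return c
--     return None
-- ===== SOURCE B (Python) =====
-- from typing import List, Optional
--
-- def _pick_date_col(cols: List[str]) -> Optional[str]:
--     fallback = None
--     for c in cols:
--         l = c.lower()
--         if "invoice" in l and "date" in l:
--             return c
--         if fallback is None and "date" in l: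
--             fallback = c
--     return fallback
-- ===== Notes on version B (the rewrite author's own statement) =====
-- stated objective: simpler
-- what changed: Folds A's two separate scans into one pass that returns an invoice+date match immediately and carries the first date-only column as a fallback.
import Mathlib
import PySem

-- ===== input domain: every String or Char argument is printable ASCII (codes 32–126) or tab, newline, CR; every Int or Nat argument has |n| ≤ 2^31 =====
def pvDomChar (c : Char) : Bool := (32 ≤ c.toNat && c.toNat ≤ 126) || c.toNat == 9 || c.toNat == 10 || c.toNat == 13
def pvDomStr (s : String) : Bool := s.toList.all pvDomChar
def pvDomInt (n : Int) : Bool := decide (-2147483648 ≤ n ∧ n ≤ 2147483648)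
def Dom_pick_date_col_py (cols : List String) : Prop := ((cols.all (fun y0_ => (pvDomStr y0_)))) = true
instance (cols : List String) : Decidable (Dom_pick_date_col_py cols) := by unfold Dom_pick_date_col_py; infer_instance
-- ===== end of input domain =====

-- B folds A's two separate scans into one pass carrying the first date-only column as a fallback (simpler; same cost).


-- ===== PORT A =====
-- first loop of A: return c if "invoice" in l and "date" in l
def pickFirstLoop : List String → Option String
  | [] => none
  | c :: t =>
    let l := PySem.Str.lower c
    if PySem.Str.isIn "invoice" l && PySem.Str.isIn "date" l then some c
    else pickFirstLoop t

-- second loop of A: return c if "date" in c.lower()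
def pickSecondLoop : List String → Option String
  | [] => none
  | c :: t =>
    if PySem.Str.isIn "date" (PySem.Str.lower c) then some c
    else pickSecondLoop t

def pick_date_col_py (cols : List String) : Option String :=
  match pickFirstLoop cols with
  | some c => some c
  | none => pickSecondLoop cols

-- ===== PORT B =====
-- single loop of B, carrying the fallback accumulator
def pickGo : List String → Option String → Option String
  | [], fb => fb
  | c :: t, fb =>
    let l := PySem.Str.lower c
    if PySem.Str.isIn "invoice" l && PySem.Str.isIn "date" l then some c
    else pickGo t (if fb.isNone && PySem.Str.isIn "date" l then some c else fb)

def pick_date_col_py_alt (cols : List String) : Option String :=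
  pickGo cols none

-- ===== PRECONDITION & SPEC =====
def Spec_pick_date_col_py (cols : List String) (out : Option String) : Prop := out = pick_date_col_py_alt cols
instance (cols : List String) (out : Option String) : Decidable (Spec_pick_date_col_py cols out) := by unfold Spec_pick_date_col_py; infer_instance

-- ===== CLAIM (what is proved, stated in full; the proofs are below) =====
def Claim_equal_pick_date_col_py : Prop := ∀ (cols : List String), Dom_pick_date_col_py cols → Spec_pick_date_col_py cols (pick_date_col_py cols)

-- ===== LEMMAS AND PROOFS =====
theorem pickGo_eq (cols : List String) : ∀ fb : Option String,
    pickGo cols fb =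
      match pickFirstLoop cols with
      | some c => some c
      | none => match fb with
        | some f => some f
        | none => pickSecondLoop cols := by
  induction cols with
  | nil => intro fb; cases fb <;> rfl
  | cons c t ih =>
    intro fb
    by_cases h1 : PySem.Chars.isIn ['i','n','v','o','i','c','e'] (PySem.Chars.lower c.toList) = true
        ∧ PySem.Chars.isIn ['d','a','t','e'] (PySem.Chars.lower c.toList) = true
    · simp [pickGo, pickFirstLoop, h1]
    · by_cases hd : PySem.Chars.isIn ['d','a','t','e'] (PySem.Chars.lower c.toList) = true
      · simp only [hd, and_true] at h1
        cases fb with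
        | none =>
          simp [pickGo, pickFirstLoop, pickSecondLoop, h1, hd, ih]
        | some f =>
          simp [pickGo, pickFirstLoop, h1, hd, ih]
      · cases fb with
        | none =>
          simp [pickGo, pickFirstLoop, pickSecondLoop, hd, ih]
        | some f =>
          simp [pickGo, pickFirstLoop, hd, ih]

-- ===== VERDICT (by name: the statement is the Claim_ definition above) =====
theorem pick_date_col_py_spec : Claim_equal_pick_date_col_py := by
  intro cols _
  unfold Spec_pick_date_col_py pick_date_col_py pick_date_col_py_alt
  rw [pickGo_eq]
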